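-- pv_equiv track=rewrite | github.com/0xV8/docpilot | src/docpilot/formatters/base.py | parse_structured_content
-- ===== SOURCE A (Python) =====
-- def parse_structured_content(content: str) -> dict[str, str | dict[str, str]]:
--     """Parse structured docstring content into sections.
--
--     Attempts to extract sections like Args, Returns, Raises from
--     unformatted content.
--
--     Args:
--         content: Raw docstring content
--
--     Returns:
--         Dictionary with sections (summary, args, returns, raises, etc.)
--     """
--     sections: dict[str, str | dict[str, str]] = {}
--     current_section = "summary"
--     current_content: list[str] = []
--
--     lines = content.splitlines()
--
--     section_keywords = {
--         "args": ["args:", "arguments:", "parameters:", "params:"],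
--         "returns": ["returns:", "return:"],
--         "raises": ["raises:", "exceptions:", "throws:"],
--         "yields": ["yields:", "yield:"],
--         "examples": ["examples:", "example:"],
--         "notes": ["notes:", "note:"],
--         "warnings": ["warnings:", "warning:"],
--     }
--
--     for line in lines:
--         line_lower = line.strip().lower()
--
--         # Check if line starts a new section
--         section_found = False
--         for section_name, keywords in section_keywords.items():
--             if any(line_lower.startswith(kw) for kw in keywords):
--                 # Save current section
--                 if current_content:
--                     sections[current_section] = "\n".join(current_content).strip()
--
--                 current_section = section_name
--                 current_content = []
--                 section_found = True
--                 break
--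
--         if not section_found:
--             current_content.append(line)
--
--     # Save final section
--     if current_content:
--         sections[current_section] = "\n".join(current_content).strip()
--
--     return sections
-- ===== SOURCE B (Python) =====
-- _SECTION_KEYWORDS = [
--     ("args", ["args:", "arguments:", "parameters:", "params:"]),
--     ("returns", ["returns:", "return:"]),
--     ("raises", ["raises:", "exceptions:", "throws:"]),
--     ("yields", ["yields:", "yield:"]),
--     ("examples", ["examples:", "example:"]),
--     ("notes", ["notes:", "note:"]),
--     ("warnings", ["warnings:", "warning:"]),
-- ]
--
--
-- def _header_name(line):
--     low = line.strip().lower()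
--     for name, kws in _SECTION_KEYWORDS:
--         if any(low.startswith(kw) for kw in kws):
--             return name
--     return None
--
--
-- def parse_structured_content(content: str) -> dict:
--     # Single backward pass: collect segments back-to-front, then one forward
--     # pass turns the non-empty segments into the sections dict.
--     segs = []   # (name, lines-of-segment in reverse order), last segment first
--     cur = []
--     for line in reversed(content.splitlines()):
--         name = _header_name(line)
--         if name is None:
--             cur.append(line)
--         else:
--             segs.append((name, cur))
--             cur = []
--     segs.append(("summary", cur))
--     sections = {}
--     for name, rev in reversed(segs):
--         if rev:
--             sections[name] = "\n".join(reversed(rev)).strip()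
--     return sections
-- ===== Notes on version B (the rewrite author's own statement) =====
-- stated objective: alternative
-- what changed: B replaces A's single forward stateful loop (current section + pending buffer flushed at each header) by a backward pass that collects (name, segment) pairs back-to-front, followed by a separate forward pass that turns non-empty segments into the sections dict.
import Mathlib
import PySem

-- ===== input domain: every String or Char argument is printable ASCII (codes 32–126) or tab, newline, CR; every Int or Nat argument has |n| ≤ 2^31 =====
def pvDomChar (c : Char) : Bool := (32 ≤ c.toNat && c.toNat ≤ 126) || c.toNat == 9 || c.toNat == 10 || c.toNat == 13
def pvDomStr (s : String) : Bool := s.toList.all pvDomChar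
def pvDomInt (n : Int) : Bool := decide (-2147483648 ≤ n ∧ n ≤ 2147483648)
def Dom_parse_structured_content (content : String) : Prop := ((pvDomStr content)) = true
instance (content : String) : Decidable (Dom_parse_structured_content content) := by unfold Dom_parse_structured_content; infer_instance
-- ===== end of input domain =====

-- B restructures A's forward flush-on-header loop into a backward segment-collecting pass
-- plus a forward dict-building pass over the segments (alternative decomposition, same cost).

-- shared helper: both Python versions detect a section header the same way
-- (strip + lower the line, first keyword group whose keyword is a prefix wins)
def pvKeywords : List (String × List String) :=
  [("args", ["args:", "arguments:", "parameters:", "params:"]),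
   ("returns", ["returns:", "return:"]),
   ("raises", ["raises:", "exceptions:", "throws:"]),
   ("yields", ["yields:", "yield:"]),
   ("examples", ["examples:", "example:"]),
   ("notes", ["notes:", "note:"]),
   ("warnings", ["warnings:", "warning:"])]

def pvFirstMatch (low : String) : List (String × List String) → Option String
  | [] => none
  | (name, kws) :: rest =>
      if kws.any (fun kw => PySem.Str.startswith low kw) then some name
      else pvFirstMatch low rest

def pvHeader? (line : String) : Option String :=
  pvFirstMatch (PySem.Str.lower (PySem.Str.strip line)) pvKeywords

-- ===== PORT A =====
-- A's loop body: on a header line flush the pending buffer and switch section,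
-- otherwise append the line to the buffer.
def pvStepA (st : PySem.Dict String String × String × List String) (line : String) :
    PySem.Dict String String × String × List String :=
  match pvHeader? line with
  | some name =>
      (if st.2.2 ≠ [] then
         st.1.insert st.2.1 (PySem.Str.strip (PySem.Str.join "\n" st.2.2))
       else st.1, name, [])
  | none => (st.1, st.2.1, st.2.2 ++ [line])

-- A's trailing "save final section"
def pvFinishA (st : PySem.Dict String String × String × List String) :
    PySem.Dict String String :=
  if st.2.2 ≠ [] then
    st.1.insert st.2.1 (PySem.Str.strip (PySem.Str.join "\n" st.2.2))
  else st.1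

def parse_structured_content (content : String) : List (String × String) :=
  (pvFinishA ((PySem.Str.splitlines content).foldl pvStepA
      (PySem.Dict.empty, "summary", []))).items

-- ===== PORT B =====
-- B's backward pass: accumulate the current segment's lines (in reverse order);
-- a header line closes the segment under its name.
def pvStepB (st : List (String × List String) × List String) (line : String) :
    List (String × List String) × List String :=
  match pvHeader? line with
  | none => (st.1, st.2 ++ [line])
  | some name => (st.1 ++ [(name, st.2)], [])

-- B's forward pass: save each non-empty segment into the dict.
def pvSaveB (d : PySem.Dict String String) (p : String × List String) :
    PySem.Dict String String :=
  if p.2 ≠ [] then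
    d.insert p.1 (PySem.Str.strip (PySem.Str.join "\n" p.2.reverse))
  else d

def parse_structured_content_alt (content : String) : List (String × String) :=
  let st := (PySem.Str.splitlines content).reverse.foldl pvStepB ([], [])
  ((st.1 ++ [("summary", st.2)]).reverse.foldl pvSaveB PySem.Dict.empty).items

-- ===== PRECONDITION & SPEC =====
def Spec_parse_structured_content (content : String) (out : List (String × String)) : Prop := out = parse_structured_content_alt content
instance (content : String) (out : List (String × String)) : Decidable (Spec_parse_structured_content content out) := by unfold Spec_parse_structured_content; infer_instance

-- ===== CLAIM (what is proved, stated in full; the proofs are below) =====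
def Claim_equal_parse_structured_content : Prop := ∀ (content : String), Dom_parse_structured_content content → Spec_parse_structured_content content (parse_structured_content content)

-- ===== LEMMAS AND PROOFS =====

-- proof-side segmentation: (leading summary segment, list of (name, segment))
def pvSplit : List String → List String × List (String × List String)
  | [] => ([], [])
  | l :: ls =>
    match pvHeader? l with
    | some n => ([], (n, (pvSplit ls).1) :: (pvSplit ls).2)
    | none => (l :: (pvSplit ls).1, (pvSplit ls).2)

-- proof-side dict building over forward-ordered segments
def pvBuild (d : PySem.Dict String String) : List (String × List String) → PySem.Dict String String
  | [] => d
  | (n, sg) :: rest =>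
      pvBuild (if sg ≠ [] then d.insert n (PySem.Str.strip (PySem.Str.join "\n" sg)) else d) rest

theorem pvLemA (lines : List String) :
    ∀ (d : PySem.Dict String String) (cur : String) (acc : List String),
    pvFinishA (lines.foldl pvStepA (d, cur, acc)) =
      pvBuild d ((cur, acc ++ (pvSplit lines).1) :: (pvSplit lines).2) := by
  induction lines with
  | nil => intro d cur acc; simp [pvFinishA, pvSplit, pvBuild]
  | cons l ls ih =>
      intro d cur acc
      simp only [List.foldl_cons, pvSplit, pvStepA]
      cases h : pvHeader? l with
      | some n =>
          simp only [ih, pvBuild]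
          simp
      | none =>
          rw [ih]
          simp [pvBuild, List.append_assoc]

theorem pvLemB (lines : List String) :
    lines.reverse.foldl pvStepB ([], []) =
      (((pvSplit lines).2.map (fun p => (p.1, p.2.reverse))).reverse,
        (pvSplit lines).1.reverse) := by
  induction lines with
  | nil => rfl
  | cons l ls ih =>
      rw [List.reverse_cons, List.foldl_append, ih]
      simp only [List.foldl_cons, List.foldl_nil, pvStepB, pvSplit]
      cases h : pvHeader? l <;> simp

theorem pvSaveB_map (r : List (String × List String)) :
    ∀ (d : PySem.Dict String String),
    (r.map (fun p => (p.1, p.2.reverse))).foldl pvSaveB d = pvBuild d r := by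
  induction r with
  | nil => intro d; rfl
  | cons p rest ih =>
      intro d
      simp only [List.map_cons, List.foldl_cons, ih, pvBuild, pvSaveB]
      congr 1
      rcases p with ⟨n, sg⟩
      simp

-- ===== VERDICT (by name: the statement is the Claim_ definition above) =====
theorem parse_structured_content_spec : Claim_equal_parse_structured_content := by
  intro content _
  unfold Spec_parse_structured_content
  unfold parse_structured_content parse_structured_content_alt
  rw [pvLemA, pvLemB]
  simp only [List.reverse_append, List.reverse_cons, List.reverse_nil, List.nil_append,
    List.reverse_reverse, List.cons_append, List.foldl_cons]
  rw [pvSaveB_map]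
  simp only [pvBuild, pvSaveB, List.reverse_reverse]
  congr 1
  simp
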